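-- pv_equiv track=rewrite | github.com/sphamandla-s/password-checker-with-python-recursion | password_cracker.py | possible_password_combRec
-- ===== SOURCE A (Python) =====
-- def possible_password_combRec(character_set, prefix, k, n):
--     if n == 0:
--         return [prefix]
--     elif not character_set or any(type(i) == int for i in character_set):
--         return []
--     else:
--      new_list = []
--      for i in range(k):
--          new = prefix + character_set[i]
--          new_list += possible_password_combRec(character_set, new, k , n - 1)
--     return new_list
-- ===== SOURCE B (Python) =====
-- def possible_password_combRec(character_set, prefix, k, n):
--     if n == 0:
--         return [prefix]
--     if not character_set or any(type(i) == int for i in character_set):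
--         return []
--     result = [prefix]
--     for _ in range(n):
--         result = [p + character_set[i] for p in result for i in range(k)]
--     return result
-- ===== Notes on version B (the rewrite author's own statement) =====
-- stated objective: alternative
-- what changed: Replaces A's tree recursion (one recursive call per chosen character) by an iterative level-by-level expansion: start from [prefix] and n times expand every partial password with each of the first k characters via one nested comprehension.
-- outside the precondition, e.g. on possible_password_combRec(['a'], 'p', 0, -1): A returns [], B returns ['p']; on possible_password_combRec(['a', 'b'], 'p', 3, 1): A raises IndexError, B raises IndexError
import Mathlib
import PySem

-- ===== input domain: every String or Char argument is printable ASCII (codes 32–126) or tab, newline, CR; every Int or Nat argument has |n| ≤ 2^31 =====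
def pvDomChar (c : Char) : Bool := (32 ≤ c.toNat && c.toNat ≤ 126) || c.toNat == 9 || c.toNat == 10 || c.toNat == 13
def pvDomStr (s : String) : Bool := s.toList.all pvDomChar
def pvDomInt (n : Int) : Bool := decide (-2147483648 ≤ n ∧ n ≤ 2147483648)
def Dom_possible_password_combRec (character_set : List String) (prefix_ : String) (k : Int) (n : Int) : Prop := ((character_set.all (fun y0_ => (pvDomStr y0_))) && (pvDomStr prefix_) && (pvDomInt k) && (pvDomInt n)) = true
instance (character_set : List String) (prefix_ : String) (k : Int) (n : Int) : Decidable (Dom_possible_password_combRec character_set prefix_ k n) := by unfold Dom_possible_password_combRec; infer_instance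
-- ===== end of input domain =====

-- B replaces A's tree recursion with an iterative level-by-level expansion (alternative decomposition, same cost).

-- ===== PORT A =====
-- 'any(type(i) == int for i in character_set)' is always False on List String (the convention fixes the element type).
def possible_password_combRec (character_set : List String) (prefix_ : String) (k : Int) (n : Int) : List String :=
  if n = 0 then [prefix_]
  else if character_set.isEmpty || character_set.any (fun _ => false) then []
  else if _h : 0 < n then
    (PySem.List.pyRange 0 k 1).foldl
      (fun new_list i =>
        new_list ++ possible_password_combRec character_set
          (prefix_ ++ PySem.List.pyGetD character_set i "") k (n - 1)) []
  else []  -- Python never returns here (n < 0 with a nonempty set and k > 0 recurses forever); excluded by Pre_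
termination_by n.toNat
decreasing_by omega

-- ===== PORT B =====
-- the nested comprehension '[p + character_set[i] for p in result for i in range(k)]'
def pwLevel (character_set : List String) (k : Int) (result : List String) : List String :=
  result.flatMap (fun p => (PySem.List.pyRange 0 k 1).map (fun i => p ++ PySem.List.pyGetD character_set i ""))

def possible_password_combRec_alt (character_set : List String) (prefix_ : String) (k : Int) (n : Int) : List String :=
  if n = 0 then [prefix_]
  else if character_set.isEmpty || character_set.any (fun _ => false) then []
  else (PySem.List.pyRange 0 n 1).foldl (fun result _ => pwLevel character_set k result) [prefix_]

-- ===== PRECONDITION & SPEC =====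
-- Pre_ excludes (a) negative n, where A either hits Python's recursion limit (nonempty set, k > 0) or
-- returns [] as an artefact of the unreached loop, and (b) n > 0 with a nonempty set and k beyond its
-- length, where A raises IndexError.
def Pre_possible_password_combRec (character_set : List String) (prefix_ : String) (k : Int) (n : Int) : Prop :=
  0 ≤ n ∧ (n = 0 ∨ character_set = [] ∨ k ≤ character_set.length)
instance (character_set : List String) (prefix_ : String) (k : Int) (n : Int) : Decidable (Pre_possible_password_combRec character_set prefix_ k n) := by unfold Pre_possible_password_combRec; infer_instance

def pvWitness_possible_password_combRec : List String × String × Int × Int := (["a", "b"], "x", 2, 2)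

def Spec_possible_password_combRec (character_set : List String) (prefix_ : String) (k : Int) (n : Int) (out : List String) : Prop := out = possible_password_combRec_alt character_set prefix_ k n
instance (character_set : List String) (prefix_ : String) (k : Int) (n : Int) (out : List String) : Decidable (Spec_possible_password_combRec character_set prefix_ k n out) := by unfold Spec_possible_password_combRec; infer_instance

-- ===== CLAIM (what is proved, stated in full; the proofs are below) =====
def Claim_equal_possible_password_combRec : Prop := ∀ (character_set : List String) (prefix_ : String) (k : Int) (n : Int), Dom_possible_password_combRec character_set prefix_ k n → Pre_possible_password_combRec character_set prefix_ k n → Spec_possible_password_combRec character_set prefix_ k n (possible_password_combRec character_set prefix_ k n)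

-- ===== LEMMAS AND PROOFS =====

-- pwLevel distributes over the elements of its input list
lemma pwLevel_iterate_flatMap (cs : List String) (k : Int) :
    ∀ (m : Nat) (xs : List String),
      (pwLevel cs k)^[m] xs = xs.flatMap (fun x => (pwLevel cs k)^[m] [x]) := by
  intro m
  induction m with
  | zero => intro xs; simp
  | succ m ih =>
    intro xs
    rw [Function.iterate_succ_apply, ih (pwLevel cs k xs)]
    have hx : ∀ x : String, (pwLevel cs k)^[m + 1] [x]
        = (pwLevel cs k [x]).flatMap (fun y => (pwLevel cs k)^[m] [y]) := by
      intro x; rw [Function.iterate_succ_apply, ih]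
    simp only [hx]
    simp [pwLevel, List.flatMap_assoc]

-- the guard 'not character_set or any(...)' is false on a nonempty List String
lemma pwGuard_false (cs : List String) (hcs : cs ≠ []) :
    (cs.isEmpty || cs.any (fun _ => false)) = false := by
  cases cs with
  | nil => exact absurd rfl hcs
  | cons a l => simp

-- A's recursion computes the m-fold level expansion of [p]
lemma a_eq_iterate (cs : List String) (hcs : cs ≠ []) (k : Int) :
    ∀ (m : Nat) (p : String),
      possible_password_combRec cs p k (m : Int) = (pwLevel cs k)^[m] [p] := by
  intro m
  induction m with
  | zero => intro p; simp [possible_password_combRec]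
  | succ m ih =>
    intro p
    rw [possible_password_combRec, if_neg (by push_cast; omega : ¬ (((m + 1 : Nat) : Int) = 0)),
      pwGuard_false cs hcs, if_neg (by decide : ¬ (false = true)),
      dif_pos (by push_cast; omega : (0 : Int) < ((m + 1 : Nat) : Int))]
    have hcast : ((m + 1 : Nat) : Int) - 1 = (m : Int) := by push_cast; ring
    simp only [hcast]
    have hfold : ∀ (acc : List String),
        (PySem.List.pyRange 0 k 1).foldl
          (fun new_list i => new_list ++ possible_password_combRec cs (p ++ PySem.List.pyGetD cs i "") k (m : Int)) acc
        = acc ++ (PySem.List.pyRange 0 k 1).flatMap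
            (fun i => possible_password_combRec cs (p ++ PySem.List.pyGetD cs i "") k (m : Int)) := by
      induction (PySem.List.pyRange 0 k 1) with
      | nil => simp
      | cons a l ihl => intro acc; simp [ihl, List.append_assoc]
    rw [hfold [], List.nil_append]
    have hfun : (fun i => possible_password_combRec cs (p ++ PySem.List.pyGetD cs i "") k (m : Int))
        = (fun i => (pwLevel cs k)^[m] [p ++ PySem.List.pyGetD cs i ""]) :=
      funext (fun i => ih _)
    rw [hfun, Function.iterate_succ_apply, pwLevel_iterate_flatMap]
    simp [pwLevel, List.flatMap_map]

-- B's fold over range(n) is the n.toNat-fold iterate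
lemma foldl_const_iterate {α β : Type} (f : α → α) (l : List β) :
    ∀ (init : α), l.foldl (fun r _ => f r) init = f^[l.length] init := by
  induction l with
  | nil => intro init; simp
  | cons a l ih => intro init; simp [ih, Function.iterate_succ_apply]

-- ===== VERDICT (by name: the statement is the Claim_ definition above) =====
theorem possible_password_combRec_spec : Claim_equal_possible_password_combRec := by
  intro cs p k n _ hpre
  unfold Spec_possible_password_combRec
  obtain ⟨hn, _⟩ := hpre
  by_cases h0 : n = 0
  · subst h0; simp [possible_password_combRec, possible_password_combRec_alt]
  · by_cases hcs : cs = []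
    · subst hcs
      rw [possible_password_combRec, possible_password_combRec_alt]
      simp [h0]
    · rw [possible_password_combRec_alt, if_neg h0, pwGuard_false cs hcs,
        if_neg (by decide : ¬ (false = true)), foldl_const_iterate,
        PySem.List.length_pyRange_one]
      have hrepr : n = ((n.toNat : Nat) : Int) := by omega
      have hlen : (n - 0).toNat = n.toNat := by omega
      rw [hlen]
      conv_lhs => rw [hrepr]
      exact a_eq_iterate cs hcs k n.toNat p
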